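-- pv_equiv track=rewrite | github.com/Tixul/NGPC-craft | midi_to_ngpc/midi_to_ngpc.py | _format_note_table
-- ===== SOURCE A (Python) =====
-- NOTE_TABLE = [
--     (0x08, 0x36), (0x07, 0x33), (0x09, 0x30), (0x0D, 0x2D),
--     (0x04, 0x2B), (0x0D, 0x28), (0x09, 0x26), (0x06, 0x24),
--     (0x05, 0x22), (0x06, 0x20), (0x09, 0x1E), (0x0E, 0x1C),
--     (0x04, 0x1B), (0x0B, 0x19), (0x04, 0x18), (0x0E, 0x16),
--     (0x09, 0x15), (0x06, 0x14), (0x04, 0x13), (0x03, 0x12),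
--     (0x02, 0x11), (0x03, 0x10), (0x04, 0x0F), (0x07, 0x0E),
--     (0x0A, 0x0D), (0x0D, 0x0C), (0x02, 0x0C), (0x07, 0x0B),
--     (0x0D, 0x0A), (0x03, 0x0A), (0x0A, 0x09), (0x01, 0x09),
--     (0x09, 0x08), (0x01, 0x08), (0x0A, 0x07), (0x03, 0x07),
--     (0x0D, 0x06), (0x06, 0x06), (0x01, 0x06), (0x0B, 0x05),
--     (0x06, 0x05), (0x01, 0x05), (0x0D, 0x04), (0x08, 0x04),
--     (0x04, 0x04), (0x00, 0x04), (0x0D, 0x03), (0x09, 0x03),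
--     (0x06, 0x03), (0x03, 0x03), (0x00, 0x03),
-- ]
--
-- def _format_note_table(label: str) -> str:
--     lines = [f"{label}:"]
--     line = "  .db "
--     for b1, b2 in NOTE_TABLE:
--         for b in (b1, b2):
--             if line.strip() == ".db":
--                 line += f"${b:02X}"
--             else:
--                 line += f", ${b:02X}"
--             if len(line) > 70:
--                 lines.append(line)
--                 line = "  .db "
--     if line.strip() != ".db":
--         lines.append(line)
--     return "\n".join(lines) + "\n"
-- ===== SOURCE B (Python) =====
-- # The note table stored as its flat byte sequence; the greedy width check in the
-- # original always packs exactly 14 two-hex-digit bytes per line, so we peel 14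
-- # bytes at a time.
-- NOTE_BYTES = bytes.fromhex(
--     "0836073309300D2D042B0D280926062405220620091E0E1C041B0B1904180E16"
--     "091506140413031202110310040F070E0A0D0D0C020C070B0D0A030A0A090109"
--     "090801080A0703070D06060601060B05060501050D040804040400040D030903"
--     "060303030003"
-- )
--
--
-- def _format_note_table(label: str) -> str:
--     lines = [f"{label}:"]
--     bs = NOTE_BYTES
--     while bs:
--         chunk, bs = bs[:14], bs[14:]
--         lines.append("  .db " + ", ".join("$%02X" % b for b in chunk))
--     return "\n".join(lines) + "\n"
-- ===== Notes on version B (the rewrite author's own statement) =====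
-- stated objective: simpler
-- what changed: Replaces the stateful greedy line builder (mutable current line, strip()-based emptiness test, width check after every byte, trailing flush) with a flat byte-string constant peeled 14 bytes at a time, each chunk joined into one .db line; the packing is computed, not simulated.
import Mathlib
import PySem

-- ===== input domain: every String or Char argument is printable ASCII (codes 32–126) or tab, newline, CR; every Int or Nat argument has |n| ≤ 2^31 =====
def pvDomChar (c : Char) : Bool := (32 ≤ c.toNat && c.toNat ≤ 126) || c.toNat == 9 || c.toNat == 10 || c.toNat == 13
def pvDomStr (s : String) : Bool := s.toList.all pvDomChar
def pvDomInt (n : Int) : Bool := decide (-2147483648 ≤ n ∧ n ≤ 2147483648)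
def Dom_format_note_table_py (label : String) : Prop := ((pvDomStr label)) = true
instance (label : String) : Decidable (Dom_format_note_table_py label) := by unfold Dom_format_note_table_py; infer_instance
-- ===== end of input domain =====

-- B replaces A's stateful greedy line builder (strip test + width check per byte)
-- by peeling 14 bytes at a time off a flat hex-encoded byte constant; objective: simpler.
-- Both ports work on List Char internally (PySem.Chars) and wrap to String at the end.

-- ===== PORT A =====
-- module constant NOTE_TABLE as A's source writes it: a list of pairs
def noteTable : List (Int × Int) := [
  (0x08, 0x36), (0x07, 0x33), (0x09, 0x30), (0x0D, 0x2D),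
  (0x04, 0x2B), (0x0D, 0x28), (0x09, 0x26), (0x06, 0x24),
  (0x05, 0x22), (0x06, 0x20), (0x09, 0x1E), (0x0E, 0x1C),
  (0x04, 0x1B), (0x0B, 0x19), (0x04, 0x18), (0x0E, 0x16),
  (0x09, 0x15), (0x06, 0x14), (0x04, 0x13), (0x03, 0x12),
  (0x02, 0x11), (0x03, 0x10), (0x04, 0x0F), (0x07, 0x0E),
  (0x0A, 0x0D), (0x0D, 0x0C), (0x02, 0x0C), (0x07, 0x0B),
  (0x0D, 0x0A), (0x03, 0x0A), (0x0A, 0x09), (0x01, 0x09),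
  (0x09, 0x08), (0x01, 0x08), (0x0A, 0x07), (0x03, 0x07),
  (0x0D, 0x06), (0x06, 0x06), (0x01, 0x06), (0x0B, 0x05),
  (0x06, 0x05), (0x01, 0x05), (0x0D, 0x04), (0x08, 0x04),
  (0x04, 0x04), (0x00, 0x04), (0x0D, 0x03), (0x09, 0x03),
  (0x06, 0x03), (0x03, 0x03), (0x00, 0x03)]


-- f"{b:02X}": hand port, exact for 0 <= b <= 255 (all table entries are in 0..0x36)
def hexDigitA (n : Nat) : Char := if n < 10 then Char.ofNat (48 + n) else Char.ofNat (55 + n)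
def hex02XA (b : Int) : List Char := [hexDigitA (b.toNat / 16), hexDigitA (b.toNat % 16)]

def dbChars : List Char := ['.', 'd', 'b']          -- ".db"
def freshLineA : List Char := [' ', ' ', '.', 'd', 'b', ' ']  -- "  .db "

-- body of A's inner 'for b in (b1, b2)' loop
def stepA (st : List (List Char) × List Char) (b : Int) : List (List Char) × List Char :=
  let line := if PySem.Chars.strip st.2 == dbChars then st.2 ++ '$' :: hex02XA b
              else st.2 ++ ',' :: ' ' :: '$' :: hex02XA b
  if PySem.Chars.len line > 70 then (st.1 ++ [line], freshLineA) else (st.1, line)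

def format_note_table_py (label : String) : String :=
  let st := noteTable.foldl (fun st p => [p.1, p.2].foldl stepA st) ([label.toList ++ [':']], freshLineA)
  let lines := if PySem.Chars.strip st.2 != dbChars then st.1 ++ [st.2] else st.1
  String.ofList (PySem.Chars.join ['\n'] lines ++ ['\n'])

-- ===== PORT B =====
-- NOTE_BYTES = bytes.fromhex("..."): the hex literal (as its character list), decoded two digits at a time
def noteHexChars : List Char := [
  '0', '8', '3', '6', '0', '7', '3', '3', '0', '9', '3', '0', '0', 'D', '2', 'D', '0', '4', '2', 'B', '0', 'D', '2', '8', '0', '9', '2', '6', '0', '6', '2', '4', '0', '5', '2', '2', '0', '6', '2', '0', '0', '9', '1', 'E', '0', 'E', '1', 'C', '0', '4', '1', 'B', '0', 'B', '1', '9', '0', '4', '1', '8', '0', 'E', '1', '6',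
  '0', '9', '1', '5', '0', '6', '1', '4', '0', '4', '1', '3', '0', '3', '1', '2', '0', '2', '1', '1', '0', '3', '1', '0', '0', '4', '0', 'F', '0', '7', '0', 'E', '0', 'A', '0', 'D', '0', 'D', '0', 'C', '0', '2', '0', 'C', '0', '7', '0', 'B', '0', 'D', '0', 'A', '0', '3', '0', 'A', '0', 'A', '0', '9', '0', '1', '0', '9',
  '0', '9', '0', '8', '0', '1', '0', '8', '0', 'A', '0', '7', '0', '3', '0', '7', '0', 'D', '0', '6', '0', '6', '0', '6', '0', '1', '0', '6', '0', 'B', '0', '5', '0', '6', '0', '5', '0', '1', '0', '5', '0', 'D', '0', '4', '0', '8', '0', '4', '0', '4', '0', '4', '0', '0', '0', '4', '0', 'D', '0', '3', '0', '9', '0', '3',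
  '0', '6', '0', '3', '0', '3', '0', '3', '0', '0', '0', '3']

def hexCharVal (c : Char) : Nat := if c.toNat ≤ 57 then c.toNat - 48 else c.toNat - 55

-- bytes.fromhex: consume the digit string pairwise (exact on this even, uppercase literal)
def bytesFromHex : List Char → List Int
  | hi :: lo :: rest => ((16 * hexCharVal hi + hexCharVal lo : Nat) : Int) :: bytesFromHex rest
  | _ => []

def noteBytes : List Int := bytesFromHex noteHexChars

-- "$%02X" % b, written via a digit-alphabet lookup
def hexAlphabet : List Char := ['0','1','2','3','4','5','6','7','8','9','A','B','C','D','E','F']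
def byteFmtB (b : Int) : List Char :=
  ['$', hexAlphabet.getD (b.toNat / 16) '0', hexAlphabet.getD (b.toNat % 16) '0']

-- the 'while bs:' loop: peel 14 bytes per line; fuel = |bs| bounds the iterations
def peelLines : Nat → List Int → List (List Char)
  | 0, _ => []
  | _, [] => []
  | fuel + 1, bs =>
      ([' ', ' ', '.', 'd', 'b', ' '] ++ PySem.Chars.join [',', ' '] ((bs.take 14).map byteFmtB))
        :: peelLines fuel (bs.drop 14)

def format_note_table_py_alt (label : String) : String :=
  String.ofList
    (PySem.Chars.join ['\n'] ((label.toList ++ [':']) :: peelLines noteBytes.length noteBytes) ++ ['\n'])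

-- ===== PRECONDITION & SPEC =====
def Spec_format_note_table_py (label : String) (out : String) : Prop := out = format_note_table_py_alt label
instance (label : String) (out : String) : Decidable (Spec_format_note_table_py label out) := by unfold Spec_format_note_table_py; infer_instance

-- ===== CLAIM (what is proved, stated in full; the proofs are below) =====
def Claim_equal_format_note_table_py : Prop := ∀ (label : String), Dom_format_note_table_py label → Spec_format_note_table_py label (format_note_table_py label)

-- ===== LEMMAS AND PROOFS =====

-- A's loop only ever APPENDS to the list of finished lines; the byte step in isolation:
lemma stepA_split (ls : List (List Char)) (ln : List Char) (b : Int) :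
    stepA (ls, ln) b = (ls ++ (stepA ([], ln) b).1, (stepA ([], ln) b).2) := by
  simp only [stepA]
  split_ifs <;> simp

-- generic: a fold whose step only appends to the first component factors through ([], ln)
lemma foldl_split {α : Type} (g : List (List Char) × List Char → α → List (List Char) × List Char)
    (hg : ∀ ls ln b, g (ls, ln) b = (ls ++ (g ([], ln) b).1, (g ([], ln) b).2)) :
    ∀ (l : List α) (ls : List (List Char)) (ln : List Char),
      l.foldl g (ls, ln) = (ls ++ (l.foldl g ([], ln)).1, (l.foldl g ([], ln)).2) := by
  intro l
  induction l with
  | nil => intro ls ln; simp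
  | cons a l ih =>
      intro ls ln
      have h := hg ls ln a
      rcases hga : g ([], ln) a with ⟨p1, p2⟩
      rw [hga] at h
      simp only [List.foldl_cons, h, hga, ih p1 p2, ih (ls ++ p1) p2, List.append_assoc]

-- the tail of each version's line list does not depend on the label
def tailA : List (List Char) :=
  let st := noteTable.foldl (fun st p => [p.1, p.2].foldl stepA st) ([], freshLineA)
  if PySem.Chars.strip st.2 != dbChars then st.1 ++ [st.2] else st.1

def tailB : List (List Char) := peelLines noteBytes.length noteBytes

lemma A_form (label : String) :
    format_note_table_py label =
      String.ofList (PySem.Chars.join ['\n'] ((label.toList ++ [':']) :: tailA) ++ ['\n']) := by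
  have h := foldl_split (fun (st : List (List Char) × List Char) (p : Int × Int) => [p.1, p.2].foldl stepA st)
      (fun ls ln p => foldl_split stepA stepA_split [p.1, p.2] ls ln) noteTable [label.toList ++ [':']] freshLineA
  simp only [format_note_table_py, tailA, h]
  split_ifs <;> simp

set_option maxRecDepth 40000 in
set_option maxHeartbeats 4000000 in
lemma tails_eq : tailA = tailB := by decide

-- ===== VERDICT (by name: the statement is the Claim_ definition above) =====
theorem format_note_table_py_spec : Claim_equal_format_note_table_py := by
  intro label _
  unfold Spec_format_note_table_py
  rw [A_form, tails_eq]
  rfl
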